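-- pv_equiv track=rewrite | github.com/Igorok/algorithms-js | leetcode/medium/3208_numberOfAlternatingGroups.py | numberOfAlternatingGroups_0
-- ===== SOURCE A (Python) =====
-- from typing import List
--
-- def numberOfAlternatingGroups_0(colors: List[int], k: int) -> int:
--     n = len(colors)
--     if k > n:
--         return 0
--
--     res = 0
--     for i in range(n):
--         isAlter = True
--         for j in range(1, k):
--             id = (n+i+j) % n
--             prev = (n+i+j-1) % n
--             if colors[id] == colors[prev]:
--                 isAlter = False
--                 break
--         if isAlter:
--             res += 1
--
--     return res
-- ===== SOURCE B (Python) =====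
-- from typing import List
--
-- def numberOfAlternatingGroups_0(colors: List[int], k: int) -> int:
--     n = len(colors)
--     if k > n:
--         return 0
--     if k <= 1:
--         return n
--     # eq[j] = 1 iff the circular neighbours colors[j], colors[(j+1)%n] are equal
--     eq = [1 if colors[j] == colors[(j + 1) % n] else 0 for j in range(n)]
--     # sliding window of the k-1 pairs inside the group starting at `start`
--     cnt = sum(eq[:k - 1])
--     res = 1 if cnt == 0 else 0
--     for start in range(1, n):
--         cnt += eq[(start + k - 2) % n] - eq[start - 1]
--         if cnt == 0:
--             res += 1
--     return res
-- ===== Notes on version B (the rewrite author's own statement) =====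
-- stated objective: faster
-- what changed: A rescans every length-k window from scratch; B precomputes a 0/1 list of equal circular neighbour pairs and slides a window of k-1 pairs around the circle once, counting windows whose running sum of equal pairs is zero.
import Mathlib
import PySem

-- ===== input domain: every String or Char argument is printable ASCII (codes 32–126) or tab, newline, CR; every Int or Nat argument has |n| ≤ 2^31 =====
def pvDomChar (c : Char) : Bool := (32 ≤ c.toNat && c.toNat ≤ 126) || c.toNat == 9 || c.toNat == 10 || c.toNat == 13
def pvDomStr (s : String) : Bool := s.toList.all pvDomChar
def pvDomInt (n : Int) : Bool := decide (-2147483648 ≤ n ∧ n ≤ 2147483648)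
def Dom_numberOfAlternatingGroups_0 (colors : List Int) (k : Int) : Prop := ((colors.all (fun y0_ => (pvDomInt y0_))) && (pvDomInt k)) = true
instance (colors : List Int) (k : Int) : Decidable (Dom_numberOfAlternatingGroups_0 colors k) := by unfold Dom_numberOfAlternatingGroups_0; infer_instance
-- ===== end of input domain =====

-- B replaces A's per-start rescan of each window by one sliding window over
-- precomputed equal-adjacent-pair indicators; same return value on every input.

-- ===== PORT A =====
-- inner 'for j in range(1, k): … break' of A, as structural recursion with early exit
def pvACheck (colors : List Int) (n i : Int) : List Int → Bool
  | [] => true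
  | j :: js =>
      if PySem.List.pyGetD colors (PySem.Int.mod (n + i + j) n) 0
           = PySem.List.pyGetD colors (PySem.Int.mod (n + i + j - 1) n) 0
      then false
      else pvACheck colors n i js

def numberOfAlternatingGroups_0 (colors : List Int) (k : Int) : Int :=
  let n : Int := colors.length
  if k > n then 0
  else
    (PySem.List.pyRange 0 n 1).foldl
      (fun res i =>
        if pvACheck colors n i (PySem.List.pyRange 1 k 1) then res + 1 else res) 0

-- ===== PORT B =====
def numberOfAlternatingGroups_0_alt (colors : List Int) (k : Int) : Int :=
  let n := colors.length
  if k > (n : Int) then 0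
  else if k ≤ 1 then (n : Int)
  else
    -- eq[j] = 1 iff colors[j] == colors[(j+1) % n]; Nat '%' is exact for Python '%' on these
    -- non-negative operands (and n > 0 on this branch)
    let eq : List Int := (List.range n).map (fun j =>
      if colors.getD j 0 = colors.getD ((j + 1) % n) 0 then (1 : Int) else 0)
    -- cnt = sum(eq[:k-1]); on this branch 1 ≤ k-1 ≤ n, so take (k-1).toNat is exactly the slice
    let cnt : Int := (eq.take (k - 1).toNat).sum
    -- 'for start in range(1, n)': List.range' 1 (n-1) is exactly range(1, n)
    let st := (List.range' 1 (n - 1)).foldl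
      (fun (st : Int × Int) (start : Nat) =>
        let c := st.1 + eq.getD (PySem.Int.mod ((start : Int) + k - 2) (n : Int)).toNat 0
                      - eq.getD (start - 1) 0
        (c, if c = 0 then st.2 + 1 else st.2))
      (cnt, if cnt = 0 then 1 else 0)
    st.2

-- ===== PRECONDITION & SPEC =====
def Spec_numberOfAlternatingGroups_0 (colors : List Int) (k : Int) (out : Int) : Prop := out = numberOfAlternatingGroups_0_alt colors k
instance (colors : List Int) (k : Int) (out : Int) : Decidable (Spec_numberOfAlternatingGroups_0 colors k out) := by unfold Spec_numberOfAlternatingGroups_0; infer_instance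

-- ===== CLAIM (what is proved, stated in full; the proofs are below) =====
def Claim_equal_numberOfAlternatingGroups_0 : Prop := ∀ (colors : List Int) (k : Int), Dom_numberOfAlternatingGroups_0 colors k → Spec_numberOfAlternatingGroups_0 colors k (numberOfAlternatingGroups_0 colors k)

-- ===== LEMMAS AND PROOFS =====

-- indicator of the circular pair at position j (read through j % n, so it is n-periodic)
def pvG (colors : List Int) (n j : Nat) : Int :=
  if colors.getD (j % n) 0 = colors.getD ((j % n + 1) % n) 0 then 1 else 0

-- number of equal adjacent pairs inside the window of m pairs starting at i
def pvW (colors : List Int) (n m i : Nat) : Int :=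
  ∑ t ∈ Finset.range m, pvG colors n (i + t)

lemma pvG_nonneg (colors : List Int) (n j : Nat) : 0 ≤ pvG colors n j := by
  unfold pvG; split <;> omega

lemma pvG_mod (colors : List Int) (n j : Nat) :
    pvG colors n (j % n) = pvG colors n j := by
  unfold pvG; rw [Nat.mod_mod _ _]

-- the two circular indices A compares at offset t are exactly the pair pvG reads
lemma pvPair_mod (n i t : Nat) :
    (n + i + t) % n = (i + t) % n ∧ (n + i + t + 1) % n = ((i + t) % n + 1) % n := by
  constructor
  · rw [show n + i + t = n + (i + t) by ring, Nat.add_mod_left]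
  · rw [show n + i + t + 1 = i + t + 1 + n by ring, Nat.add_mod_right,
        Nat.add_mod (i + t) 1 n]
    conv_rhs => rw [Nat.add_mod ((i + t) % n) 1 n, Nat.mod_mod _ _]

lemma pvW_zero_iff (colors : List Int) (n m i : Nat) :
    pvW colors n m i = 0 ↔ ∀ t < m, pvG colors n (i + t) = 0 := by
  unfold pvW
  rw [Finset.sum_eq_zero_iff_of_nonneg (fun t _ => pvG_nonneg colors n (i + t))]
  simp

lemma pvW_slide (colors : List Int) (n m i : Nat) (hm : 1 ≤ m) :
    pvW colors n m (i + 1) + pvG colors n i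
      = pvW colors n m i + pvG colors n (i + m) := by
  obtain ⟨mm, rfl⟩ : ∃ mm, m = mm + 1 := ⟨m - 1, by omega⟩
  unfold pvW
  rw [Finset.sum_range_succ (fun t => pvG colors n (i + 1 + t)) mm,
      Finset.sum_range_succ' (fun t => pvG colors n (i + t)) mm]
  have h1 : ∀ t, i + 1 + t = i + (t + 1) := by omega
  simp only [h1, Nat.add_zero]
  have h2 : i + (mm + 1) = i + 1 + mm := by omega
  rw [h2]; ring

-- the eq-list of port B reads pvG at every index below n
lemma pvEq_getD (colors : List Int) (n p : Nat) (hp : p < n) :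
    ((List.range n).map (fun j =>
        if colors.getD j 0 = colors.getD ((j + 1) % n) 0 then (1 : Int) else 0)).getD p 0
      = pvG colors n p := by
  rw [PySem.List.getD_map_range _ _ _ _ hp]
  unfold pvG
  rw [Nat.mod_eq_of_lt hp]

-- A's inner check, characterised as "all pairs of the window differ"
lemma pvACheck_eq_all (colors : List Int) (n i : Int) (js : List Int) :
    pvACheck colors n i js
      = js.all (fun j =>
          !(PySem.List.pyGetD colors (PySem.Int.mod (n + i + j) n) 0
              = PySem.List.pyGetD colors (PySem.Int.mod (n + i + j - 1) n) 0 : Bool)) := by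
  induction js with
  | nil => rfl
  | cons j js ih =>
      simp only [pvACheck, List.all_cons]
      split <;> simp_all

lemma pvACheck_iff (colors : List Int) (k : Int) (i n m : Nat)
    (hm : (m : Int) = k - 1) :
    (pvACheck colors (n : Int) (i : Int) (PySem.List.pyRange 1 k 1) = true)
      ↔ pvW colors n m i = 0 := by
  rw [pvACheck_eq_all, pvW_zero_iff, List.all_eq_true]
  constructor
  · intro h t ht
    have hj : ((t : Int) + 1) ∈ PySem.List.pyRange 1 k 1 := by
      rw [PySem.List.mem_pyRange_one]; omega
    have := h _ hj
    have harg2 : (n : Int) + i + ((t : Int) + 1) - 1 = ((n + i + t : Nat) : Int) := by push_cast; ring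
    have harg1 : (n : Int) + i + ((t : Int) + 1) = ((n + i + t + 1 : Nat) : Int) := by push_cast; ring
    rw [harg2, harg1, PySem.Int.mod_natCast, PySem.Int.mod_natCast,
        PySem.List.pyGetD_natCast, PySem.List.pyGetD_natCast] at this
    simp only [Bool.not_eq_eq_eq_not, Bool.not_true, decide_eq_false_iff_not] at this
    obtain ⟨e1, e2⟩ := pvPair_mod n i t
    rw [e1, e2] at this
    unfold pvG
    simp only [ite_eq_right_iff]
    intro hc; exact absurd hc.symm this
  · intro h j hj
    rw [PySem.List.mem_pyRange_one] at hj
    obtain ⟨t, rfl⟩ : ∃ t : Nat, j = (t : Int) + 1 := ⟨(j - 1).toNat, by omega⟩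
    have ht : t < m := by omega
    have := h t ht
    have harg2 : (n : Int) + i + ((t : Int) + 1) - 1 = ((n + i + t : Nat) : Int) := by push_cast; ring
    have harg1 : (n : Int) + i + ((t : Int) + 1) = ((n + i + t + 1 : Nat) : Int) := by push_cast; ring
    rw [harg2, harg1, PySem.Int.mod_natCast, PySem.Int.mod_natCast,
        PySem.List.pyGetD_natCast, PySem.List.pyGetD_natCast]
    simp only [Bool.not_eq_eq_eq_not, Bool.not_true, decide_eq_false_iff_not]
    obtain ⟨e1, e2⟩ := pvPair_mod n i t
    rw [e1, e2]
    unfold pvG at this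
    intro hc
    rw [if_pos hc.symm] at this
    omega

-- initial window sum of port B is pvW at start 0
lemma pvInit_sum (colors : List Int) (n m : Nat) (hmn : m ≤ n) :
    (((List.range n).map (fun j =>
        if colors.getD j 0 = colors.getD ((j + 1) % n) 0 then (1 : Int) else 0)).take m).sum
      = pvW colors n m 0 := by
  rw [← List.map_take, List.take_range, Nat.min_eq_left hmn]
  unfold pvW
  induction m with
  | zero => simp
  | succ mm ih =>
      rw [List.range_succ, List.map_append, List.sum_append,
          Finset.sum_range_succ, ih (by omega)]
      simp only [List.map_cons, List.map_nil, List.sum_cons, List.sum_nil, Nat.zero_add]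
      unfold pvG
      rw [Nat.mod_eq_of_lt (show mm < n by omega)]
      ring

-- the sliding-window loop of port B, fully characterised
lemma pvBLoop (colors : List Int) (k : Int) (n m : Nat)
    (hn0 : 0 < n) (hk2 : 2 ≤ k) (hm : (m : Int) = k - 1)
    (len : Nat) :
    ∀ (i0 : Nat) (r : Int), i0 + len ≤ n - 1 →
      (List.range' (i0 + 1) len).foldl
        (fun (st : Int × Int) (start : Nat) =>
          let c := st.1 + ((List.range n).map (fun j =>
              if colors.getD j 0 = colors.getD ((j + 1) % n) 0 then (1 : Int) else 0)).getD
                (PySem.Int.mod ((start : Int) + k - 2) (n : Int)).toNat 0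
            - ((List.range n).map (fun j =>
              if colors.getD j 0 = colors.getD ((j + 1) % n) 0 then (1 : Int) else 0)).getD
                (start - 1) 0
          (c, if c = 0 then st.2 + 1 else st.2))
        (pvW colors n m i0, r)
      = (pvW colors n m (i0 + len),
         r + ((List.range' (i0 + 1) len).countP (fun s => pvW colors n m s = 0) : Int)) := by
  induction len with
  | zero => intro i0 r _; simp
  | succ ll ih =>
      intro i0 r hlen
      rw [List.range'_succ]
      simp only [List.foldl_cons, List.countP_cons]
      have hidx1 : (PySem.Int.mod (((i0 + 1 : Nat) : Int) + k - 2) (n : Int)).toNat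
          = (i0 + m) % n := by
        rw [show ((i0 + 1 : Nat) : Int) + k - 2 = ((i0 + m : Nat) : Int) by push_cast; omega,
            PySem.Int.mod_natCast, Int.toNat_natCast]
      rw [hidx1, pvEq_getD colors n _ (Nat.mod_lt _ hn0),
          show i0 + 1 - 1 = i0 by omega, pvEq_getD colors n _ (by omega), pvG_mod]
      have hc : pvW colors n m i0 + pvG colors n (i0 + m) - pvG colors n i0
          = pvW colors n m (i0 + 1) := by
        have := pvW_slide colors n m i0 (by omega)
        omega
      rw [hc]
      rw [ih (i0 + 1) (if pvW colors n m (i0 + 1) = 0 then r + 1 else r) (by omega)]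
      rw [Prod.mk.injEq]
      refine ⟨by rw [show i0 + 1 + ll = i0 + (ll + 1) by omega], ?_⟩
      simp only [decide_eq_true_eq]
      push_cast
      split_ifs with h <;> omega

-- counting through A's outer fold
lemma pvA_count (colors : List Int) (k : Int) (n m : Nat)
    (hm : (m : Int) = k - 1) :
    (PySem.List.pyRange 0 (n : Int) 1).foldl
      (fun res i =>
        if pvACheck colors (n : Int) i (PySem.List.pyRange 1 k 1) then res + 1 else res) 0
      = (((List.range n).countP (fun i => pvW colors n m i = 0) : Nat) : Int) := by
  rw [PySem.List.foldl_count_if]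
  rw [show PySem.List.pyRange 0 (n : Int) 1 = (List.range n).map (fun k : Nat => (k : Int)) from
    by rw [PySem.List.pyRange_one]; simp]
  rw [List.countP_map]
  simp only [Int.zero_add]
  congr 1
  apply List.countP_congr
  intro i hi
  rw [List.mem_range] at hi
  simp [Function.comp_apply, ← pvACheck_iff colors k i n m hm]

-- k ≤ 1: every window is trivially alternating, A returns n
lemma pvA_trivial (colors : List Int) (k : Int) (hk : k ≤ 1) :
    (PySem.List.pyRange 0 (colors.length : Int) 1).foldl
      (fun res i =>
        if pvACheck colors (colors.length : Int) i (PySem.List.pyRange 1 k 1) then res + 1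
        else res) 0 = (colors.length : Int) := by
  rw [PySem.List.pyRange_one_eq_nil (by omega : k ≤ 1), PySem.List.foldl_count_if]
  have hall : List.countP (fun i => pvACheck colors (colors.length : Int) i [])
      (PySem.List.pyRange 0 (colors.length : Int) 1) = (PySem.List.pyRange 0 (colors.length : Int) 1).length :=
    List.countP_eq_length.mpr (fun a _ => rfl)
  rw [hall]
  simp [PySem.List.length_pyRange_one]

-- ===== VERDICT (by name: the statement is the Claim_ definition above) =====
theorem numberOfAlternatingGroups_0_spec : Claim_equal_numberOfAlternatingGroups_0 := by
  intro colors k _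
  unfold Spec_numberOfAlternatingGroups_0 numberOfAlternatingGroups_0 numberOfAlternatingGroups_0_alt
  by_cases hkn : k > (colors.length : Int)
  · simp only [if_pos hkn]
  · by_cases hk1 : k ≤ 1
    · simp only [if_neg hkn, if_pos hk1]
      exact pvA_trivial colors k hk1
    · simp only [if_neg hkn, if_neg hk1]
      have hk2 : 2 ≤ k := by omega
      have hn0 : 0 < colors.length := by omega
      have hm : (((k - 1).toNat : Nat) : Int) = k - 1 := by omega
      rw [pvA_count colors k colors.length (k - 1).toNat hm]
      rw [pvInit_sum colors colors.length (k - 1).toNat (by omega)]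
      have hloop := pvBLoop colors k colors.length (k - 1).toNat hn0 hk2 hm
        (colors.length - 1) 0
        (if pvW colors colors.length (k - 1).toNat 0 = 0 then 1 else 0) (by omega)
      rw [show (0 : Nat) + 1 = 1 from rfl] at hloop
      rw [hloop]
      have hr : List.range colors.length = 0 :: List.range' 1 (colors.length - 1) := by
        obtain ⟨nn, hnn⟩ : ∃ nn, colors.length = nn + 1 := ⟨colors.length - 1, by omega⟩
        rw [hnn, List.range_eq_range', List.range'_succ]
        simp
      rw [hr, List.countP_cons]
      simp only [decide_eq_true_eq]
      push_cast
      split_ifs with h <;> omega
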